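-- pv_equiv track=rewrite | github.com/CAHLR/representation_presenter | representation_presenter.py | norep
-- ===== SOURCE A (Python) =====
-- def norep(datalist):
--     newlist = []
--     for item in datalist:
--         smallitem = []
--         for word in item:
--             if len(smallitem)==0 or smallitem[len(smallitem)-1]!=word:
--                 smallitem.append(word)
--         newlist.append(smallitem)
--     return newlist
-- ===== SOURCE B (Python) =====
-- def norep(datalist):
--     def collapse(item):
--         out = []
--         i = 0
--         n = len(item)
--         while i < n:
--             out.append(item[i])
--             j = i + 1
--             while j < n and item[j] == item[i]:
--                 j += 1
--             i = j
--         return out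
--     return [collapse(item) for item in datalist]
-- ===== Notes on version B (the rewrite author's own statement) =====
-- stated objective: alternative
-- what changed: B collapses each sublist by run-skipping (emit the run head, then advance an index past the whole run of equal elements) inside a list comprehension, instead of A's accumulator loop that compares each word with the last appended element.
import Mathlib
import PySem

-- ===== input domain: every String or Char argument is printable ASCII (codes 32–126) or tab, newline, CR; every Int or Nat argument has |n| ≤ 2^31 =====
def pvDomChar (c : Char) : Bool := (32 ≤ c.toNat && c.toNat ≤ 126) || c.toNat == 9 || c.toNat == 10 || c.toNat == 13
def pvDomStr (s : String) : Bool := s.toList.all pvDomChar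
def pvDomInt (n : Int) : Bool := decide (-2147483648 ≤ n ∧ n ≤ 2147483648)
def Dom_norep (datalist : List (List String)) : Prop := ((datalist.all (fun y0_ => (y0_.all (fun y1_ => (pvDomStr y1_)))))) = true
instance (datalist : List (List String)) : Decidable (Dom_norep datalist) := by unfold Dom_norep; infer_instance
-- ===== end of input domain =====

-- B collapses each sublist by run-skipping (drop the whole run of equal heads, recurse) instead of A's track-last accumulator loop; objective: alternative.


-- ===== PORT A =====
-- inner loop of A: track the accumulator, append word when empty or last element differs
def norepStep (s : List String) (w : String) : List String :=
  if s.length = 0 ∨ PySem.List.pyGet? s ((s.length : Int) - 1) ≠ some w then s ++ [w] else s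

def norep (datalist : List (List String)) : List (List String) :=
  datalist.foldl (fun newlist item => newlist ++ [item.foldl norepStep []]) []

-- ===== PORT B =====
-- B's collapse: emit the run head, skip past the run (the inner while loop = dropWhile), recurse
def collapseRuns : List String → List String
  | [] => []
  | x :: xs => x :: collapseRuns (xs.dropWhile (· == x))
termination_by l => l.length
decreasing_by
  simp only [List.length_cons]
  exact Nat.lt_succ_of_le (List.length_dropWhile_le _ _)

def norep_alt (datalist : List (List String)) : List (List String) :=
  datalist.map collapseRuns

-- ===== PRECONDITION & SPEC =====
def Spec_norep (datalist : List (List String)) (out : List (List String)) : Prop := out = norep_alt datalist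
instance (datalist : List (List String)) (out : List (List String)) : Decidable (Spec_norep datalist out) := by unfold Spec_norep; infer_instance

-- ===== CLAIM (what is proved, stated in full; the proofs are below) =====
def Claim_equal_norep : Prop := ∀ (datalist : List (List String)), Dom_norep datalist → Spec_norep datalist (norep datalist)

-- ===== LEMMAS AND PROOFS =====

-- A's step on a nonempty accumulator compares with the last element
lemma norepStep_snoc (s : List String) (x w : String) :
    norepStep (s ++ [x]) w = if w = x then s ++ [x] else s ++ [x] ++ [w] := by
  by_cases h : w = x
  · simp [norepStep, PySem.List.pyGet?, PySem.List.pyIdx?, h]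
  · simp [norepStep, PySem.List.pyGet?, PySem.List.pyIdx?, h, Ne.symm h]

lemma foldl_norepStep_eq (ws : List String) (s : List String) (x : String) :
    ws.foldl norepStep (s ++ [x]) = (s ++ [x]) ++ collapseRuns (ws.dropWhile (· == x)) := by
  induction ws generalizing s x with
  | nil => simp [collapseRuns]
  | cons w ws ih =>
    rw [List.foldl_cons, norepStep_snoc]
    by_cases h : w = x
    · simp [h, List.dropWhile, ih]
    · have hbe : (w == x) = false := by simp [h]
      have hdrop : (w :: ws).dropWhile (· == x) = w :: ws := by
        simp [List.dropWhile, hbe]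
      rw [if_neg h, hdrop, collapseRuns]
      have := ih (s ++ [x]) w
      simpa using this

lemma inner_eq (ws : List String) : ws.foldl norepStep [] = collapseRuns ws := by
  cases ws with
  | nil => simp [collapseRuns]
  | cons w ws =>
    rw [List.foldl_cons]
    have h0 : norepStep [] w = [] ++ [w] := by simp [norepStep]
    rw [h0, foldl_norepStep_eq ws [] w]
    simp [collapseRuns]

-- ===== VERDICT (by name: the statement is the Claim_ definition above) =====
theorem norep_spec : Claim_equal_norep := by
  intro datalist hdom
  clear hdom
  unfold Spec_norep norep norep_alt
  induction datalist using List.reverseRecOn with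
  | nil => rfl
  | append_singleton xs x ih =>
    rw [List.foldl_append, List.foldl_cons, List.foldl_nil, ih, List.map_append]
    simp [inner_eq]
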